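-- pv_equiv track=rewrite | github.com/code-philia/TRACE | RQ1_locator/locator-fine-grain/metric/fuzzy_insertion_metric.py | insert_remaining_as_lists
-- ===== SOURCE A (Python) =====
-- def insert_remaining_as_lists(merged_list_of_lists, actual_length):
--     # extract all ints that are merged
--     merged_elements = set()
--     for lst in merged_list_of_lists:
--         merged_elements.update(lst)
--
--     # find rest of int and insert them as single element list
--     remaining_elements = set(range(actual_length)) - merged_elements
--     for elem in remaining_elements:
--         merged_list_of_lists.append([elem])
--
--     # sort based on final list
--     merged_list_of_lists.sort(key=lambda x: x[0])
--
--     return merged_list_of_lists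
-- ===== SOURCE B (Python) =====
-- def insert_remaining_as_lists(merged_list_of_lists, actual_length):
--     # values already covered by some sublist
--     present = {v for lst in merged_list_of_lists for v in lst}
--     # missing values as singleton lists, already in ascending order
--     singles = [[v] for v in range(actual_length) if v not in present]
--     # stably sort the original groups by first element
--     groups = sorted(merged_list_of_lists, key=lambda x: x[0])
--     # linear merge of the two sorted sequences (no ties across the two:
--     # a singleton's value is never any group's first element)
--     result = []
--     i = 0
--     for s in singles:
--         while i < len(groups) and groups[i][0] < s[0]:
--             result.append(groups[i]); i += 1
--         result.append(s)
--     result.extend(groups[i:])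
--     merged_list_of_lists[:] = result   # same in-place mutation as A
--     return merged_list_of_lists
-- ===== Notes on version B (the rewrite author's own statement) =====
-- stated objective: alternative
-- what changed: Instead of appending the missing singletons and sorting the whole list once, B computes the missing values as an already-ascending list, stably sorts only the original groups by first element, and combines the two sorted sequences with a linear two-way merge (ties cannot cross the groups), then slice-assigns the result back in place.
import Mathlib
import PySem

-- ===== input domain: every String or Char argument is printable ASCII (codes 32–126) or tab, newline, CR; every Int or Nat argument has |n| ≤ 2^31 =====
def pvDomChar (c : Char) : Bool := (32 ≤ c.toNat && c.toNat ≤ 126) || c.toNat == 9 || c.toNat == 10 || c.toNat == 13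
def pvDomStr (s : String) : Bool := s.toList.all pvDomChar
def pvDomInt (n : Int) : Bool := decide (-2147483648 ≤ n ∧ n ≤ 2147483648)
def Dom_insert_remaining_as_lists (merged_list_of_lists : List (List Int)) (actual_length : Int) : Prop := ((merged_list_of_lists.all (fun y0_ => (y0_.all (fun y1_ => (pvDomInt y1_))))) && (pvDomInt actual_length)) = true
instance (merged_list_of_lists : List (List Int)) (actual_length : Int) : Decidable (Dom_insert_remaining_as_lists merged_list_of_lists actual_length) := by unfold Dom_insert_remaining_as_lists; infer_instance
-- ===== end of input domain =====

-- B combines an already-ascending list of missing singletons with the stably sorted groups by a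
-- linear two-way merge instead of appending and re-sorting everything (alternative decomposition,
-- same asymptotic cost). Both A and B mutate the argument list in place in Python; the theorems
-- below are about the (identical) returned value.

-- ===== PORT A =====
-- Python iterates the set 'remaining_elements' in hash order before sorting; since the appended
-- singletons carry pairwise-distinct values that (under Pre_) never tie with any group's first
-- element, the sorted result does not depend on that order, so the set is consumed in its
-- insertion (ascending) order here.  The sort key x[0] raises IndexError on an empty sublist;
-- Pre_ excludes those inputs, so 'headD 0' is exact on the admitted domain.
def insert_remaining_as_lists (merged_list_of_lists : List (List Int)) (actual_length : Int) : List (List Int) :=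
  let merged_elements : PySem.Set Int :=
    merged_list_of_lists.foldl (fun s lst => PySem.Set.update s lst) PySem.Set.empty
  let remaining_elements : PySem.Set Int :=
    PySem.Set.diff (PySem.Set.ofList (PySem.List.pyRange 0 actual_length 1)) merged_elements
  let appended := remaining_elements.foldl (fun acc elem => acc ++ [[elem]]) merged_list_of_lists
  PySem.List.sorted appended (fun x => x.headD 0) false

-- ===== PORT B =====
-- the 'for s in singles: while … append groups[i] …; append s' merge loop of Source B:
-- structural recursion on the singletons, the inner while is takeWhile/dropWhile on the groups
def pvMerge : List (List Int) → List (List Int) → List (List Int)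
  | groups, [] => groups
  | groups, s :: ss =>
      groups.takeWhile (fun g => decide (g.headD 0 < s.headD 0)) ++
        s :: pvMerge (groups.dropWhile (fun g => decide (g.headD 0 < s.headD 0))) ss

def insert_remaining_as_lists_alt (merged_list_of_lists : List (List Int)) (actual_length : Int) : List (List Int) :=
  let present : PySem.Set Int := PySem.Set.ofList merged_list_of_lists.flatten
  let singles := ((PySem.List.pyRange 0 actual_length 1).filter
      (fun v => !present.contains v)).map (fun v => [v])
  let groups := PySem.List.sorted merged_list_of_lists (fun x => x.headD 0) false
  pvMerge groups singles

-- ===== PRECONDITION & SPEC =====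
-- Pre_ excludes inputs containing an empty sublist: there Python A raises IndexError on the
-- sort key x[0] (and Python B likewise); A returns normally on every other input.
def Pre_insert_remaining_as_lists (merged_list_of_lists : List (List Int)) (actual_length : Int) : Prop :=
  ∀ l ∈ merged_list_of_lists, l ≠ []
instance (merged_list_of_lists : List (List Int)) (actual_length : Int) : Decidable (Pre_insert_remaining_as_lists merged_list_of_lists actual_length) := by unfold Pre_insert_remaining_as_lists; infer_instance

def pvWitness_insert_remaining_as_lists : List (List Int) × Int := ([[2, 0], [5, 5]], 4)

def Spec_insert_remaining_as_lists (merged_list_of_lists : List (List Int)) (actual_length : Int) (out : List (List Int)) : Prop := out = insert_remaining_as_lists_alt merged_list_of_lists actual_length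
instance (merged_list_of_lists : List (List Int)) (actual_length : Int) (out : List (List Int)) : Decidable (Spec_insert_remaining_as_lists merged_list_of_lists actual_length out) := by unfold Spec_insert_remaining_as_lists; infer_instance

-- ===== CLAIM (what is proved, stated in full; the proofs are below) =====
def Claim_equal_insert_remaining_as_lists : Prop := ∀ (merged_list_of_lists : List (List Int)) (actual_length : Int), Dom_insert_remaining_as_lists merged_list_of_lists actual_length → Pre_insert_remaining_as_lists merged_list_of_lists actual_length → Spec_insert_remaining_as_lists merged_list_of_lists actual_length (insert_remaining_as_lists merged_list_of_lists actual_length)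

-- ===== LEMMAS AND PROOFS =====

-- membership in A's element-collecting fold
lemma mem_foldl_update (m : List (List Int)) (s : PySem.Set Int) (v : Int) :
    v ∈ m.foldl (fun s lst => PySem.Set.update s lst) s ↔ v ∈ s ∨ v ∈ m.flatten := by
  induction m generalizing s with
  | nil => simp
  | cons l m ih => simp [ih, PySem.Set.mem_update, or_assoc]

lemma nodup_pyRange01 (n : Int) : (PySem.List.pyRange 0 n 1).Nodup := by
  simp only [PySem.List.pyRange]
  norm_num
  exact List.nodup_range.map (fun a b h => by omega)

lemma pairwise_lt_pyRange01 (n : Int) : (PySem.List.pyRange 0 n 1).Pairwise (· < ·) := by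
  simp only [PySem.List.pyRange]
  norm_num
  exact List.pairwise_map.mpr (List.pairwise_lt_range.imp (fun h => by omega))

lemma takeWhile_dropWhile_congr {α : Type} (p q : α → Bool) (L : List α)
    (h : ∀ y ∈ L, p y = q y) :
    L.takeWhile p = L.takeWhile q ∧ L.dropWhile p = L.dropWhile q := by
  induction L with
  | nil => exact ⟨rfl, rfl⟩
  | cons y L ih =>
      have hy := h y (by simp)
      obtain ⟨h1, h2⟩ := ih (fun z hz => h z (by simp [hz]))
      constructor <;> simp only [List.takeWhile_cons, List.dropWhile_cons, hy, h1, h2]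

lemma insertBy_cons {α : Type} (before : α → α → Bool) (x y : α) (l : List α) :
    PySem.List.insertBy before x (y :: l) =
      if before x y then x :: y :: l else y :: PySem.List.insertBy before x l := by
  simp [PySem.List.insertBy]

-- inserting x whose key is not below any key of the prefix P skips P
lemma insertBy_append (x : List Int) (P Q : List (List Int))
    (h : ∀ y ∈ P, ¬ x.headD 0 < y.headD 0) :
    PySem.List.insertBy (fun a b => decide (a.headD 0 < b.headD 0)) x (P ++ Q) =
      P ++ PySem.List.insertBy (fun a b => decide (a.headD 0 < b.headD 0)) x Q := by
  induction P with
  | nil => rfl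
  | cons y P ih =>
      have hb : decide (x.headD 0 < y.headD 0) = false := by
        simpa using h y (by simp)
      rw [List.cons_append, insertBy_cons, hb, if_neg Bool.false_ne_true,
        ih (fun z hz => h z (by simp [hz]))]
      rfl

-- a whole batch of insertions whose keys are not below any key of the prefix P skips P
lemma foldl_insertBy_append (S : List (List Int)) :
    ∀ (P Q : List (List Int)), (∀ x ∈ S, ∀ y ∈ P, ¬ x.headD 0 < y.headD 0) →
    S.foldl (fun acc x =>
        PySem.List.insertBy (fun a b => decide (a.headD 0 < b.headD 0)) x acc) (P ++ Q) =
      P ++ S.foldl (fun acc x =>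
        PySem.List.insertBy (fun a b => decide (a.headD 0 < b.headD 0)) x acc) Q := by
  induction S with
  | nil => intro P Q _; rfl
  | cons s S ih =>
      intro P Q h
      simp only [List.foldl_cons]
      rw [insertBy_append _ _ _ (fun y hy => h s (by simp) y hy)]
      exact ih P _ (fun x hx y hy => h x (by simp [hx]) y hy)

-- insertBy splits the list at the first element with a strictly larger key
lemma insertBy_eq_takeWhile (x : List Int) (L : List (List Int)) :
    PySem.List.insertBy (fun a b => decide (a.headD 0 < b.headD 0)) x L =
      L.takeWhile (fun y => !decide (x.headD 0 < y.headD 0)) ++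
        x :: L.dropWhile (fun y => !decide (x.headD 0 < y.headD 0)) := by
  induction L with
  | nil => rfl
  | cons y L ih =>
      by_cases h : x.headD 0 < y.headD 0
      · have hb : (!decide (x.headD 0 < y.headD 0)) = false := by simpa using h
        rw [insertBy_cons, if_pos (by simpa using h), List.takeWhile_cons,
          List.dropWhile_cons, hb, if_neg Bool.false_ne_true, if_neg Bool.false_ne_true,
          List.nil_append]
      · have hb : (!decide (x.headD 0 < y.headD 0)) = true := by simpa using h
        rw [insertBy_cons, if_neg (by simpa using h), List.takeWhile_cons,
          List.dropWhile_cons, hb, if_pos rfl, if_pos rfl, ih, List.cons_append]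

-- the heart of the equivalence: inserting a strictly-key-increasing, key-disjoint batch S one by
-- one into a sorted list L (what A's sort does with the singletons, by stability) is B's merge
lemma foldl_insertBy_eq_pvMerge (S : List (List Int)) :
    ∀ (L : List (List Int)),
    L.Pairwise (fun a b => a.headD 0 ≤ b.headD 0) →
    S.Pairwise (fun a b => a.headD 0 < b.headD 0) →
    (∀ s ∈ S, ∀ x ∈ L, x.headD 0 ≠ s.headD 0) →
    S.foldl (fun acc x =>
        PySem.List.insertBy (fun a b => decide (a.headD 0 < b.headD 0)) x acc) L =
      pvMerge L S := by
  induction S with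
  | nil => intro L _ _ _; rfl
  | cons s S ih =>
      intro L hL hS hd
      have hpq : ∀ y ∈ L, (!decide (s.headD 0 < y.headD 0)) = decide (y.headD 0 < s.headD 0) := by
        intro y hy
        have hne : y.headD 0 ≠ s.headD 0 := hd s (by simp) y hy
        by_cases h : y.headD 0 < s.headD 0
        · have e1 : decide (y.headD 0 < s.headD 0) = true := by simpa using h
          have e2 : decide (s.headD 0 < y.headD 0) = false := by
            simpa using (by omega : ¬ s.headD 0 < y.headD 0)
          rw [e1, e2]
          rfl
        · have e1 : decide (y.headD 0 < s.headD 0) = false := by simpa using h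
          have e2 : decide (s.headD 0 < y.headD 0) = true := by
            simpa using (by omega : s.headD 0 < y.headD 0)
          rw [e1, e2]
          rfl
      obtain ⟨htake, hdrop⟩ := takeWhile_dropWhile_congr _ _ L hpq
      simp only [List.foldl_cons, pvMerge]
      rw [insertBy_eq_takeWhile, htake, hdrop]
      have hcomm := foldl_insertBy_append S
        (L.takeWhile (fun g => decide (g.headD 0 < s.headD 0)) ++ [s])
        (L.dropWhile (fun g => decide (g.headD 0 < s.headD 0)))
        (by
          intro x hx y hy
          have hsx : s.headD 0 < x.headD 0 := by
            have := (List.pairwise_cons.mp hS).1 x hx; simpa using this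
          rcases List.mem_append.mp hy with hy | hy
          · have := List.mem_takeWhile_imp hy
            simp only [decide_eq_true_eq] at this
            omega
          · simp only [List.mem_singleton] at hy
            subst hy; omega)
      simp only [List.append_assoc, List.cons_append, List.nil_append] at hcomm
      rw [hcomm]
      rw [ih _ (hL.sublist (List.dropWhile_sublist _))
        (List.pairwise_cons.mp hS).2
        (fun a ha x hx => hd a (by simp [ha]) x ((List.dropWhile_sublist _).subset hx))]

-- ===== VERDICT (by name: the statement is the Claim_ definition above) =====
theorem insert_remaining_as_lists_spec : Claim_equal_insert_remaining_as_lists := by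
  intro m n _ hpre
  unfold Spec_insert_remaining_as_lists
  unfold insert_remaining_as_lists insert_remaining_as_lists_alt
  simp only [PySem.Set.diff]
  -- both ports filter the range by the same "not covered by a sublist" test
  have hcontA : ∀ v : Int,
      (m.foldl (fun s lst => PySem.Set.update s lst) PySem.Set.empty).contains v =
        decide (v ∈ m.flatten) := by
    intro v
    rw [PySem.Set.contains_eq_decide]
    simp only [decide_eq_decide]
    simp [mem_foldl_update, PySem.Set.empty]
  have hcontB : ∀ v : Int,
      (PySem.Set.ofList m.flatten).contains v = decide (v ∈ m.flatten) := by
    intro v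
    rw [PySem.Set.contains_eq_decide]
    simp only [decide_eq_decide]
    exact PySem.Set.mem_ofList _ _
  have hfiltA : (PySem.Set.ofList (PySem.List.pyRange 0 n 1)).filter
        (fun x => !(m.foldl (fun s lst => PySem.Set.update s lst) PySem.Set.empty).contains x) =
      (PySem.List.pyRange 0 n 1).filter (fun v => !decide (v ∈ m.flatten)) := by
    rw [PySem.Set.ofList_eq_self_of_nodup _ (nodup_pyRange01 n)]
    exact List.filter_congr (fun v _ => by rw [hcontA v])
  have hfiltB : (PySem.List.pyRange 0 n 1).filter
        (fun v => !(PySem.Set.ofList m.flatten).contains v) =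
      (PySem.List.pyRange 0 n 1).filter (fun v => !decide (v ∈ m.flatten)) := by
    exact List.filter_congr (fun v _ => by rw [hcontB v])
  rw [hfiltA, hfiltB]
  set R : List Int := (PySem.List.pyRange 0 n 1).filter (fun v => !decide (v ∈ m.flatten)) with hR
  -- A's append loop is m ++ singletons
  rw [PySem.List.foldl_append_singleton_eq_map (fun e : Int => [e]) R m]
  set S : List (List Int) := R.map (fun v => [v]) with hS
  -- sorted with this key is the insertBy fold (beta-reduced form)
  have hsorted : ∀ xs : List (List Int),
      PySem.List.sorted xs (fun x => x.headD 0) = xs.foldl (fun acc x =>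
        PySem.List.insertBy (fun a b => decide (a.headD 0 < b.headD 0)) x acc) [] := by
    intro xs
    rw [PySem.List.sorted_eq_foldl_insertBy]
  -- A's sort of (m ++ S) = inserting S into sorted m, by stability
  rw [hsorted (m ++ S), List.foldl_append, hsorted m]
  have hRmem : ∀ v ∈ R, v ∉ m.flatten := by
    intro v hv
    have := List.of_mem_filter hv
    simpa using this
  refine foldl_insertBy_eq_pvMerge S _ ?_ ?_ ?_
  · rw [← hsorted m]
    have := PySem.List.sorted_pairwise m (fun x : List Int => x.headD 0)
    exact this.imp (fun h => by simpa using h)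
  · rw [hS, List.pairwise_map]
    exact ((pairwise_lt_pyRange01 n).filter _).imp (fun h => by simpa using h)
  · intro s hs x hx
    rw [hS] at hs
    rcases List.mem_map.mp hs with ⟨v, hv, rfl⟩
    rw [← hsorted m] at hx
    have hxm : x ∈ m := (PySem.List.mem_sorted m _ false x).mp hx
    rcases List.exists_cons_of_ne_nil (hpre x hxm) with ⟨a, t, rfl⟩
    have hmem : a ∈ m.flatten := List.mem_flatten.mpr ⟨a :: t, hxm, by simp⟩
    have hnot := hRmem v hv
    simp only [List.headD_cons]
    intro hEq
    rw [hEq] at hmem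
    exact hnot hmem
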